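-- pv_equiv track=rewrite | github.com/pypi-data/pypi-mirror-386 | packages/wowool-common/wowool_common-3.6.4-py3-none-any.whl/wowool/utility/iterators/__init__.py | iterate_prv
-- ===== SOURCE A (Python) =====
-- from typing import Iterator, Tuple, Any, List
--
-- def iterate_prv(my_list: List[Any]) -> Iterator[Tuple[int, Any, Any]]:
--     """Create an iterator that returns previous and current elements.
--
--     Args:
--         my_list: List to iterate over.
--
--     Yields:
--         Tuple of (index, previous_item, current_item).
--     """
--     (
--         prv,
--         cur,
--     ) = None, iter(my_list)
--
--     idx = 0
--     while True:
--         try: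
--             if prv:
--                 yield idx, next(prv), next(cur)
--             else:
--                 yield idx, None, next(cur)
--                 prv = iter(my_list)
--             idx += 1
--         except StopIteration:
--             break
-- ===== SOURCE B (Python) =====
-- def iterate_prv(my_list):
--     prev = None
--     for idx, cur in enumerate(my_list):
--         yield idx, prev, cur
--         prev = cur
-- ===== Notes on version B (the rewrite author's own statement) =====
-- stated objective: idiomatic
-- what changed: Replaced the while/try-except two-iterator scheme (a trailing second iterator over the same list plus a manual index counter) with a single enumerate pass that keeps only the previous element in a variable.
import Mathlib
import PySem

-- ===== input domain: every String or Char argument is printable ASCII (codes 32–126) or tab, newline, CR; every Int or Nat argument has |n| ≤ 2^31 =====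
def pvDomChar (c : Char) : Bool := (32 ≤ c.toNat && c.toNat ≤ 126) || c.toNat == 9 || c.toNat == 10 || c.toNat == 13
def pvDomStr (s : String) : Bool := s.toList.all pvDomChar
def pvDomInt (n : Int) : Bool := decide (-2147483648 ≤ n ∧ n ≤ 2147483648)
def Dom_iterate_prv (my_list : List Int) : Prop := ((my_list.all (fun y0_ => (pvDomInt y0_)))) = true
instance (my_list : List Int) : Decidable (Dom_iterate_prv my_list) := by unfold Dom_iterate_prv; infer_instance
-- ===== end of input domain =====

-- B replaces A's while/try-except loop over TWO iterators (a trailing second iterator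
-- plus a manual index counter) with one enumerate-style pass keeping only the previous
-- element in a variable; objective: idiomatic. Same return values for every list.

-- ===== PORT A =====
-- A's loop state: `prv` (None, or the trailing iterator modelled as its remaining list),
-- `cur` (the main iterator's remaining list), `idx`. next() on an exhausted iterator
-- raises StopIteration, caught → break: both `[]` cases below.
def iterate_prvAux (full : List Int) (prv : Option (List Int)) (cur : List Int) (idx : Int) :
    List (Int × Option Int × Int) :=
  match prv with
  | some pl =>
    match pl, cur with
    | [], _ => []            -- next(prv) raises StopIteration
    | _ :: _, [] => []       -- next(cur) raises StopIteration
    | p :: pt, c :: ct => (idx, some p, c) :: iterate_prvAux full (some pt) ct (idx + 1)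
  | none =>
    match cur with
    | [] => []               -- next(cur) raises StopIteration
    | c :: ct => (idx, none, c) :: iterate_prvAux full (some full) ct (idx + 1)
  termination_by cur.length

def iterate_prv (my_list : List Int) : List (Int × Option Int × Int) :=
  iterate_prvAux my_list none my_list 0

-- ===== PORT B =====
-- B's loop: prev starts None; yield (idx, prev, cur); prev := cur.
def iterate_prvAltAux (prev : Option Int) (idx : Int) : List Int → List (Int × Option Int × Int)
  | [] => []
  | c :: rest => (idx, prev, c) :: iterate_prvAltAux (some c) (idx + 1) rest

def iterate_prv_alt (my_list : List Int) : List (Int × Option Int × Int) :=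
  iterate_prvAltAux none 0 my_list

-- ===== PRECONDITION & SPEC =====
def Spec_iterate_prv (my_list : List Int) (out : List (Int × Option Int × Int)) : Prop := out = iterate_prv_alt my_list
instance (my_list : List Int) (out : List (Int × Option Int × Int)) : Decidable (Spec_iterate_prv my_list out) := by unfold Spec_iterate_prv; infer_instance

-- ===== CLAIM (what is proved, stated in full; the proofs are below) =====
def Claim_equal_iterate_prv : Prop := ∀ (my_list : List Int), Dom_iterate_prv my_list → Spec_iterate_prv my_list (iterate_prv my_list)

-- ===== LEMMAS AND PROOFS =====

-- Invariant of A's steady state: the trailing iterator's remainder is the last-yielded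
-- element consed onto the main iterator's remainder.
theorem iterate_prvAux_some (full : List Int) :
    ∀ (cur : List Int) (p : Int) (idx : Int),
      iterate_prvAux full (some (p :: cur)) cur idx = iterate_prvAltAux (some p) idx cur := by
  intro cur
  induction cur with
  | nil => intro p idx; simp [iterate_prvAux, iterate_prvAltAux]
  | cons c ct ih => intro p idx; simp [iterate_prvAux, iterate_prvAltAux, ih c (idx + 1)]

-- ===== VERDICT (by name: the statement is the Claim_ definition above) =====
theorem iterate_prv_spec : Claim_equal_iterate_prv := by
  intro my_list _
  unfold Spec_iterate_prv iterate_prv iterate_prv_alt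
  cases my_list with
  | nil => simp [iterate_prvAux, iterate_prvAltAux]
  | cons x rest =>
    simp [iterate_prvAux, iterate_prvAltAux, iterate_prvAux_some (x :: rest) rest x 1]
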